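-- pv_equiv track=rewrite | github.com/ipcjs/fcitx5-pinyin-zhwiki | convert.py | flat_phrases
-- ===== SOURCE A (Python) =====
-- def flat_phrases(phrases):
--     """
--     @see https://zhuanlan.zhihu.com/p/66930500
--     """
--     lines = []
--
--     def process(arr, index=0):
--         if index >= len(phrases):
--             lines.append(arr.copy())
--             return
--         for it in phrases[index]:
--             arr.append(it)
--             process(arr, index+1)
--             arr.pop()
--
--     process([])
--     return [' '.join(line) for line in lines]
-- ===== SOURCE B (Python) =====
-- def flat_phrases(phrases):
--     """Iterative product accumulator instead of recursive DFS/backtracking."""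
--     results = [[]]
--     for plist in phrases:
--         results = [prefix + [it] for prefix in results for it in plist]
--     return [' '.join(combo) for combo in results]
-- ===== Notes on version B (the rewrite author's own statement) =====
-- stated objective: idiomatic
-- what changed: Replaces the recursive DFS/backtracking helper with an iterative fold that rebuilds the list of prefixes once per phrase list.
import Mathlib
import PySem

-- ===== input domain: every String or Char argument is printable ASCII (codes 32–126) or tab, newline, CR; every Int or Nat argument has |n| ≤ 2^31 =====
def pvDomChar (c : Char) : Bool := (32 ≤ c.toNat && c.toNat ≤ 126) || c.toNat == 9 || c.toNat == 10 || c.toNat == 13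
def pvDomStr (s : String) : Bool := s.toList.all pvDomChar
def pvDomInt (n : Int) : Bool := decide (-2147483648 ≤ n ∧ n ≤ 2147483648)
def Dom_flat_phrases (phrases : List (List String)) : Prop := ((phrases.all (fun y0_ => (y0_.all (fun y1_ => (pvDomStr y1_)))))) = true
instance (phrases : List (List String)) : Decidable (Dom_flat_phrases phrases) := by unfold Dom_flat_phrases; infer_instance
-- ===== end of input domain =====

-- B replaces A's recursive DFS/backtracking helper with an iterative fold over the phrase
-- lists (objective: more idiomatic); same return value on all inputs.

-- ===== PORT A =====
-- A's recursive helper `process(arr, index)`: appends completed lines to the accumulator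
-- `lines`; the mutable arr/append/pop pair becomes passing `arr ++ [it]` to the recursive call.
def flat_phrases_process (phrases : List (List String)) (arr : List String) (index : Nat)
    (lines : List (List String)) : List (List String) :=
  if index ≥ phrases.length then lines ++ [arr]
  else (phrases.getD index []).foldl
    (fun acc it => flat_phrases_process phrases (arr ++ [it]) (index + 1) acc) lines
termination_by phrases.length - index
decreasing_by omega

def flat_phrases (phrases : List (List String)) : List String :=
  (flat_phrases_process phrases [] 0 []).map (fun line => PySem.Str.join " " line)

-- ===== PORT B =====
def flat_phrases_alt (phrases : List (List String)) : List String :=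
  (phrases.foldl
    (fun results plist => results.flatMap (fun pre => plist.map (fun it => pre ++ [it])))
    [[]]).map (fun combo => PySem.Str.join " " combo)

-- ===== PRECONDITION & SPEC =====
def Spec_flat_phrases (phrases : List (List String)) (out : List String) : Prop := out = flat_phrases_alt phrases
instance (phrases : List (List String)) (out : List String) : Decidable (Spec_flat_phrases phrases out) := by unfold Spec_flat_phrases; infer_instance

-- ===== CLAIM (what is proved, stated in full; the proofs are below) =====
def Claim_equal_flat_phrases : Prop := ∀ (phrases : List (List String)), Dom_flat_phrases phrases → Spec_flat_phrases phrases (flat_phrases phrases)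

-- ===== LEMMAS AND PROOFS =====

-- Cartesian product of a list of lists, in A's (and B's) enumeration order.
def pvProd (ls : List (List String)) : List (List String) :=
  match ls with
  | [] => [[]]
  | l :: rest => l.flatMap (fun it => (pvProd rest).map (fun t => it :: t))

-- A's recursion appends exactly the suffix product preed by arr.
theorem process_eq (phrases : List (List String)) : ∀ (index : Nat) (arr : List String)
    (lines : List (List String)),
    flat_phrases_process phrases arr index lines
      = lines ++ (pvProd (phrases.drop index)).map (fun t => arr ++ t) := by
  intro index
  induction hn : phrases.length - index using Nat.strong_induction_on generalizing index with
  | _ n ih =>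
    intro arr lines
    rw [flat_phrases_process]
    by_cases h : index ≥ phrases.length
    · simp [h, List.drop_eq_nil_of_le h, pvProd]
    · simp only [h, if_false]
      push Not at h
      have hdrop : phrases.drop index = phrases[index] :: phrases.drop (index + 1) :=
        List.drop_eq_getElem_cons h
      have hgetD : phrases.getD index [] = phrases[index] := by
        simp [List.getD, List.getElem?_eq_getElem h]
      rw [hgetD, hdrop]
      -- induct over the current phrase list, tracking accumulated lines
      generalize phrases[index] = l
      induction l generalizing lines with
      | nil => simp [pvProd]
      | cons x xs ihl =>
        simp only [List.foldl_cons]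
        rw [ih (phrases.length - (index + 1)) (by omega) (index + 1) rfl,
            ihl]
        simp [pvProd, List.append_assoc]

-- B's fold equals flatMap-ing the product of the remaining lists onto every pre.
theorem foldl_eq (ls : List (List String)) :
    ∀ (acc : List (List String)),
    ls.foldl (fun results plist =>
        results.flatMap (fun pre => plist.map (fun it => pre ++ [it]))) acc
      = acc.flatMap (fun p => (pvProd ls).map (fun t => p ++ t)) := by
  induction ls with
  | nil => intro acc; simp [pvProd]
  | cons l rest ih =>
    intro acc
    simp only [List.foldl_cons, ih, pvProd]
    rw [List.flatMap_assoc]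
    congr 1
    funext p
    rw [List.map_flatMap, List.flatMap_map]
    congr 1
    funext it
    simp [List.map_map, Function.comp]


theorem flat_phrases_eq_alt (phrases : List (List String)) :
    flat_phrases phrases = flat_phrases_alt phrases := by
  unfold flat_phrases flat_phrases_alt
  rw [process_eq phrases 0 [] [], foldl_eq]
  simp

-- ===== VERDICT (by name: the statement is the Claim_ definition above) =====
theorem flat_phrases_spec : Claim_equal_flat_phrases := by
  intro phrases _
  exact flat_phrases_eq_alt phrases
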